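-- pv_equiv track=rewrite | github.com/HaLT3103/Python | icpc0104 tim so nho nhat.py | solve
-- ===== SOURCE A (Python) =====
-- def solve(s):
--     a = []
--     tmp = ''
--     for i in s:
--         if i.isdigit():
--             tmp += i
--         else:
--             if tmp != '':
--                 a.append(int(tmp))
--             tmp = ''
--     if tmp != '':
--         a.append(int(tmp))
--     return min(a)
-- ===== SOURCE B (Python) =====
-- def solve(s):
--     # map every non-digit to a space, let split() find the maximal digit runs
--     tokens = ''.join(c if c.isdigit() else ' ' for c in s).split()
--     return min(int(t) for t in tokens)
-- ===== Notes on version B (the rewrite author's own statement) =====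
-- stated objective: simpler
-- what changed: Replaced the manual digit-accumulator state machine (tmp buffer with flush logic) by a one-shot tokenization: map every non-digit character to a space, split() into maximal digit runs, and take min of their int values.
import Mathlib
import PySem

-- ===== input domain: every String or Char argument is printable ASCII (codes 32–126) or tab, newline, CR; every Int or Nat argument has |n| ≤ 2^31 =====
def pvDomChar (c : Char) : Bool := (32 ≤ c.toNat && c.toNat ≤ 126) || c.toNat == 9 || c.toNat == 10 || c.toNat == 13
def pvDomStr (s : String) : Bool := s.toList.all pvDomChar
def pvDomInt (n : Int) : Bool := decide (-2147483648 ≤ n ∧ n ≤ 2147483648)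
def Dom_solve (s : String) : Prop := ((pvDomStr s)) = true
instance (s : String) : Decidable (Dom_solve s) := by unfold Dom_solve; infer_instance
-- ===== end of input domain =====

-- B replaces A's manual digit-accumulator state machine by "blank out non-digits, split(), min" (objective: simpler).

-- ===== PORT A =====
-- one loop iteration of A: accumulate digits into tmp, flush int(tmp) on a non-digit
def solveStep (st : List Int × List Char) (c : Char) : List Int × List Char :=
  if PySem.Chars.isdigit c then (st.1, st.2 ++ [c])
  else if st.2 ≠ [] then (st.1 ++ [(PySem.Int.ofChars? st.2).getD 0], []) else (st.1, [])

-- the trailing "if tmp != '': a.append(int(tmp))" after the loop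
-- (int(tmp) on a nonempty digit run never fails; the getD 0 defaults are unreachable inside Pre_solve)
def solveFlush (st : List Int × List Char) : List Int :=
  if st.2 ≠ [] then st.1 ++ [(PySem.Int.ofChars? st.2).getD 0] else st.1

def solve (s : String) : Int :=
  (PySem.List.min? (solveFlush (s.toList.foldl solveStep ([], []))) (fun x => x)).getD 0

-- ===== PORT B =====
def solve_alt (s : String) : Int :=
  (PySem.List.min?
    ((PySem.Chars.split₀ (s.toList.map (fun c => if PySem.Chars.isdigit c then c else ' '))).map
      (fun t => (PySem.Int.ofChars? t).getD 0))
    (fun x => x)).getD 0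

-- ===== PRECONDITION & SPEC =====
-- Pre_ excludes exactly the strings with no digit character: there A's min([]) raises ValueError.
def Pre_solve (s : String) : Prop := s.toList.any PySem.Chars.isdigit = true
instance (s : String) : Decidable (Pre_solve s) := by unfold Pre_solve; infer_instance
def pvWitness_solve : String := "a12 b3"

def Spec_solve (s : String) (out : Int) : Prop := out = solve_alt s
instance (s : String) (out : Int) : Decidable (Spec_solve s out) := by unfold Spec_solve; infer_instance

-- ===== CLAIM (what is proved, stated in full; the proofs are below) =====
def Claim_equal_solve : Prop := ∀ (s : String), Dom_solve s → Pre_solve s → Spec_solve s (solve s)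

-- ===== LEMMAS AND PROOFS =====

lemma digit_not_space (c : Char) (h : PySem.Chars.isdigit c = true) :
    PySem.Chars.isspace c = false := by
  have h' : 48 ≤ c.toNat ∧ c.toNat ≤ 57 := by
    simp only [PySem.Chars.isdigit, Bool.and_eq_true, decide_eq_true_eq] at h
    exact ⟨UInt32.le_iff_toNat_le.mp (Char.le_def.mp h.1),
           UInt32.le_iff_toNat_le.mp (Char.le_def.mp h.2)⟩
  simp [PySem.Chars.isspace]
  omega

lemma key (cs tmp : List Char) (racc : List (List Char)) :
    solveFlush (cs.foldl solveStep (racc.reverse.map (fun t => (PySem.Int.ofChars? t).getD 0), tmp))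
    = (PySem.Chars.split₀.go (cs.map (fun c => if PySem.Chars.isdigit c then c else ' '))
        tmp.reverse racc).map (fun t => (PySem.Int.ofChars? t).getD 0) := by
  induction cs generalizing tmp racc with
  | nil =>
    simp [PySem.Chars.split₀.go, solveFlush]
    cases tmp with
    | nil => simp
    | cons t ts => simp
  | cons c cs ih =>
    by_cases hd : PySem.Chars.isdigit c = true
    · have hns : PySem.Chars.isspace c = false := digit_not_space c hd
      simp only [List.foldl_cons, List.map_cons, solveStep, hd, if_pos,
        PySem.Chars.split₀.go, hns]
      have := ih (tmp ++ [c]) racc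
      simpa using this
    · simp only [List.foldl_cons, List.map_cons, solveStep, hd, if_false,
        Bool.false_eq_true]
      have hsp : PySem.Chars.isspace ' ' = true := by decide
      cases tmp with
      | nil =>
        simp only [PySem.Chars.split₀.go, hsp, if_true, List.reverse_nil, List.isEmpty_nil]
        simpa using ih [] racc
      | cons t ts =>
        have hne : (t :: ts) ≠ ([] : List Char) := by simp
        rw [if_pos hne]
        simp only [PySem.Chars.split₀.go, hsp, if_true]
        rw [show ((t :: ts).reverse.isEmpty) = false by simp]
        simpa using ih [] ((t :: ts) :: racc)

-- ===== VERDICT (by name: the statement is the Claim_ definition above) =====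
theorem solve_spec : Claim_equal_solve := by
  unfold Claim_equal_solve
  intro s _ _
  unfold Spec_solve solve solve_alt PySem.Chars.split₀
  have h := key s.toList [] []
  simp only [List.reverse_nil, List.map_nil] at h
  rw [h]
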